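-- pv_equiv track=rewrite | github.com/FerdinandoPH/adviento_2023 | dia11/dia11p1.py | expandir_filas
-- ===== SOURCE A (Python) =====
-- def expandir_filas(lineas):
--   frozen_lineas=tuple(lineas)
--   compensador=0
--   for i in range(len(frozen_lineas)):
--     for j in range(len(frozen_lineas[0])):
--       if frozen_lineas[i][j]!=".":
--         break
--     else:
--       lineas.insert(i+compensador,"."*len(lineas[0]))
--       compensador+=1
--   return lineas
-- ===== SOURCE B (Python) =====
-- def expandir_filas(lineas):
--     if not lineas:
--         return lineas
--     l = len(lineas[0])
--     blank = "." * l
--     out = []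
--     for row in lineas:
--         if row[:l] == blank:
--             out.append(blank)
--         out.append(row)
--     lineas[:] = out
--     return lineas
-- ===== Notes on version B (the rewrite author's own statement) =====
-- stated objective: simpler
-- what changed: Replaces the compensador-offset in-place insertion over indices (with a for-else char loop) by a single build-and-append pass that appends a precomputed blank row before each all-dots row.
import Mathlib
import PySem

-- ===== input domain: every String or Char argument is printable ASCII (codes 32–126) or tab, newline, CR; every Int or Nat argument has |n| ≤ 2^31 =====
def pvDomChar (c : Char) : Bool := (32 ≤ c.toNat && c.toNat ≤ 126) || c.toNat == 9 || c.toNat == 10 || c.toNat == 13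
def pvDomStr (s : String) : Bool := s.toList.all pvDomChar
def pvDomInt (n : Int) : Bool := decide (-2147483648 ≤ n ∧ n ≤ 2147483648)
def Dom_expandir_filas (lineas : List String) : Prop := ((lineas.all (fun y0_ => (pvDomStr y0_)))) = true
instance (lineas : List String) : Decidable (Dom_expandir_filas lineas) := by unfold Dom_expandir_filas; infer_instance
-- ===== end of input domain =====

-- B replaces A's compensador-offset in-place insertion by a one-pass build-and-splice (simpler decomposition).
-- A mutates its argument in place; the equivalence proved here is about the RETURN value only (the Python B performs the same splice).

-- ===== PORT A =====
def pvDots (n : Nat) : String := String.ofList (List.replicate n '.')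

-- inner for-j loop with its for-else: True iff no break, i.e. all j in range(L) have row[j] == '.'
def pvCondA (L : Nat) (row : String) : Bool :=
  (PySem.List.pyRange 0 (L : Int) 1).all (fun j => PySem.Str.pyGet? row j == some '.')

def pvStepA (frozen : List String) (st : List String × Int) (i : Nat) : List String × Int :=
  if pvCondA (frozen.headD "").toList.length (frozen.getD i "") = true then
    (PySem.List.insert st.1 ((i : Int) + st.2) (pvDots (st.1.headD "").toList.length), st.2 + 1)
  else st

def expandir_filas (lineas : List String) : List String :=
  ((List.range lineas.length).foldl (pvStepA lineas) (lineas, 0)).1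

-- ===== PORT B =====
def expandir_filas_alt (lineas : List String) : List String :=
  match lineas with
  | [] => lineas
  | first :: _ =>
    let l := first.toList.length
    let blank := String.ofList (List.replicate l '.')
    lineas.foldl (fun out row =>
      (if row.toList.take l = blank.toList then out ++ [blank] else out) ++ [row]) []

-- ===== PRECONDITION & SPEC =====
-- Pre_ excludes exactly the inputs on which the Python A raises IndexError: some row made only
-- of dots that is shorter than the first row (the inner char loop indexes past that row's end).
def Pre_expandir_filas (lineas : List String) : Prop :=
  ∀ s ∈ lineas, s.toList.all (fun c => c == '.') = true →
    (lineas.headD "").toList.length ≤ s.toList.length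
instance (lineas : List String) : Decidable (Pre_expandir_filas lineas) := by
  unfold Pre_expandir_filas; infer_instance

def pvWitness_expandir_filas : List String := ["#.", "..", ".#"]

def Spec_expandir_filas (lineas : List String) (out : List String) : Prop := out = expandir_filas_alt lineas
instance (lineas : List String) (out : List String) : Decidable (Spec_expandir_filas lineas out) := by unfold Spec_expandir_filas; infer_instance

-- ===== CLAIM (what is proved, stated in full; the proofs are below) =====
def Claim_equal_expandir_filas : Prop := ∀ (lineas : List String), Dom_expandir_filas lineas → Pre_expandir_filas lineas → Spec_expandir_filas lineas (expandir_filas lineas)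

-- ===== LEMMAS AND PROOFS =====

-- the common per-row expansion: blank row (width L) before the row iff its L-prefix is all dots
def pvF (L : Nat) (row : String) : List String :=
  if row.toList.take L = List.replicate L '.' then [pvDots L, row] else [row]

lemma take_eq_replicate_iff (cs : List Char) (L : Nat) :
    cs.take L = List.replicate L '.' ↔ ∀ j < L, cs[j]? = some '.' := by
  induction L generalizing cs with
  | zero => simp
  | succ L ih =>
    cases cs with
    | nil =>
      simp [List.replicate_succ]
      exact ⟨0, by omega⟩
    | cons c cs =>
      rw [List.take_succ_cons, List.replicate_succ]
      constructor
      · rintro h j hj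
        injection h with h1 h2
        cases j with
        | zero => simp [h1]
        | succ j => simpa using (ih cs).mp h2 j (by omega)
      · intro h
        have h0 := h 0 (by omega)
        simp at h0
        have hrest := (ih cs).mpr (fun j hj => by simpa using h (j+1) (by omega))
        simp [h0, hrest]

lemma condA_iff (L : Nat) (row : String) :
    pvCondA L row = true ↔ row.toList.take L = List.replicate L '.' := by
  unfold pvCondA
  rw [List.all_eq_true, take_eq_replicate_iff]
  constructor
  · intro h j hj
    have := h (j : Int) (by rw [PySem.List.mem_pyRange_one]; constructor <;> omega)
    simpa using this
  · intro h j hj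
    rw [PySem.List.mem_pyRange_one] at hj
    have hj' : j = ((j.toNat : Nat) : Int) := by omega
    rw [hj', beq_iff_eq]
    simp only [PySem.Str.pyGet?_natCast]
    exact h j.toNat (by omega)

lemma condA_eq (L : Nat) (row : String) :
    pvCondA L row = decide (row.toList.take L = List.replicate L '.') := by
  cases hb : pvCondA L row with
  | false =>
    symm
    rw [decide_eq_false_iff_not, ← condA_iff, hb]
    simp
  | true =>
    symm
    rw [decide_eq_true_eq, ← condA_iff]
    exact hb

lemma b_foldl (L : Nat) (rows : List String) (acc : List String) :
    rows.foldl (fun out row =>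
      (if row.toList.take L = (String.ofList (List.replicate L '.')).toList then out ++ [String.ofList (List.replicate L '.')] else out) ++ [row]) acc
    = acc ++ rows.flatMap (pvF L) := by
  simp only [String.toList_ofList]
  induction rows generalizing acc with
  | nil => simp
  | cons r rows ih =>
    rw [List.foldl_cons, ih, List.flatMap_cons]
    by_cases h : List.take L r.toList = List.replicate L '.'
    · rw [if_pos h]
      simp [pvF, pvDots, h]
    · rw [if_neg h]
      simp [pvF, h]

lemma head_len (frozen : List String) (hne : frozen ≠ []) (k : Nat)
    (L : Nat) (hL : L = (frozen.headD "").toList.length) :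
    ((((frozen.take k).flatMap (pvF L)) ++ frozen.drop k).headD "").toList.length = L := by
  obtain ⟨a, rest, rfl⟩ := List.exists_cons_of_ne_nil hne
  cases k with
  | zero => simp [hL]
  | succ k =>
    simp only [List.take_succ_cons, List.flatMap_cons, List.append_assoc]
    unfold pvF
    split_ifs with h
    · simp [pvDots]
    · simpa using hL.symm

lemma A_inv (frozen : List String) (hne : frozen ≠ []) (k : Nat) (hk : k ≤ frozen.length) :
    (List.range k).foldl (pvStepA frozen) (frozen, 0)
      = (((frozen.take k).flatMap (pvF ((frozen.headD "").toList.length)) ++ frozen.drop k),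
         ((((frozen.take k).flatMap (pvF ((frozen.headD "").toList.length))).length : Int) - k)) := by
  induction k with
  | zero => simp
  | succ k ih =>
    have hk' : k ≤ frozen.length := by omega
    have hklt : k < frozen.length := by omega
    rw [List.range_succ, List.foldl_append, ih hk']
    set L := (frozen.headD "").toList.length with hL
    set E := (frozen.take k).flatMap (pvF L) with hE
    have hrow : frozen.getD k "" = frozen[k] := by
      simp [List.getD_eq_getElem?_getD, List.getElem?_eq_getElem hklt]
    have hdrop : frozen.drop k = frozen[k] :: frozen.drop (k+1) := by
      rw [List.drop_eq_getElem_cons hklt]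
    have htake : frozen.take (k+1) = frozen.take k ++ [frozen[k]] := by
      rw [List.take_add_one, List.getElem?_eq_getElem hklt]
      rfl
    have hE1 : (frozen.take (k+1)).flatMap (pvF L) = E ++ pvF L frozen[k] := by
      rw [htake, List.flatMap_append]
      simp
      exact hE.symm
    have hheadlen : (((E ++ frozen.drop k).headD "")).toList.length = L :=
      head_len frozen hne k L hL
    simp only [List.foldl_cons, List.foldl_nil, pvStepA, hrow, condA_eq, ← hL,
      decide_eq_true_eq]
    split_ifs with hc
    · -- all-dots row: insert blank at position k + comp = |E|
      have hpos : ((k : Int) + (((E.length : Int)) - (k : Int))) = ((E.length : Nat) : Int) := by omega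
      have hlen : E.length ≤ (E ++ frozen.drop k).length := by simp
      have hf : pvF L frozen[k] = [pvDots L, frozen[k]] := by
        unfold pvF
        rw [if_pos hc]
      rw [hpos, PySem.List.insert_natCast _ _ _ hlen, hheadlen, List.take_left,
        List.drop_left, hE1, hf, hdrop]
      refine Prod.ext ?_ ?_
      · simp
      · simp
        omega
    · have hf : pvF L frozen[k] = [frozen[k]] := by
        unfold pvF
        rw [if_neg hc]
      rw [hE1, hf, hdrop]
      refine Prod.ext ?_ ?_
      · simp
      · simp

lemma ports_agree (lineas : List String) :
    expandir_filas lineas = expandir_filas_alt lineas := by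
  cases lineas with
  | nil => rfl
  | cons first rest =>
    have hne : (first :: rest) ≠ [] := by simp
    unfold expandir_filas expandir_filas_alt
    rw [A_inv (first :: rest) hne (first :: rest).length le_rfl]
    simp only [List.take_length, List.drop_length, List.append_nil]
    rw [b_foldl]
    simp

-- ===== VERDICT (by name: the statement is the Claim_ definition above) =====
theorem expandir_filas_spec : Claim_equal_expandir_filas := by
  intro lineas _ _
  unfold Spec_expandir_filas
  exact ports_agree lineas
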